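-- pv_equiv track=rewrite | github.com/AlexeyGorbunov72/DigitalCulture_Brain | test.py | partice_replace
-- ===== SOURCE A (Python) =====
-- def partice_replace(word1, word2):
--
--     if min(len(word1), len(word2)) == 0:
--         return max(len(word1), len(word2))
--
--     if len(word1) > len(word2):
--         smallest_word = word2
--         greatest_word = word1
--
--     else:
--         smallest_word = word1
--         greatest_word = word2
--
--     great_move = ""
--     for i in range(min(len(word1), len(word2)), 0, -1):
--         for j in range(min(len(word2), len(word1)) - i + 1):
--             great_move = smallest_word[j: i + j]
--
--             for z in range(len(greatest_word) - len(great_move) + 1):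
--
--
--                 if great_move == greatest_word[z: z + len(great_move)]:
--                     return partice_replace(smallest_word[0: j], greatest_word[0: z]) + partice_replace(smallest_word[i + j:], greatest_word[z+len(great_move): ])
--
--     return max(len(word2), len(word1))
-- ===== SOURCE B (Python) =====
-- def partice_replace(word1, word2):
--     if not word1 or not word2:
--         return max(len(word1), len(word2))
--     if len(word1) > len(word2):
--         s, g = word2, word1
--     else:
--         s, g = word1, word2
--     ng = len(g)
--     # rows[j][z] = length of the longest common prefix of s[j:] and g[z:],
--     # built bottom-up in one O(len(s)*len(g)) pass
--     prev = [0] * ng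
--     rows = []
--     for j in range(len(s) - 1, -1, -1):
--         prev = [(((prev[z + 1] if z + 1 < ng else 0) + 1) if s[j] == g[z] else 0)
--                 for z in range(ng)]
--         rows.append(prev)
--     rows.reverse()
--     best = bj = bz = 0
--     for j in range(len(s)):
--         row = rows[j]
--         for z in range(ng):
--             if best < row[z]:
--                 best, bj, bz = row[z], j, z
--     if best == 0:
--         return max(len(word1), len(word2))
--     return partice_replace(s[:bj], g[:bz]) + partice_replace(s[bj + best:], g[bz + best:])
-- ===== Notes on version B (the rewrite author's own statement) =====
-- stated objective: faster
-- what changed: Replaces A's per-length triple scan over all substring slices with a single O(n*m) suffix-LCP dynamic-programming table per call, picking the same match (longest, then smallest index in the shorter word, then in the longer) before recursing.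
import Mathlib
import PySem

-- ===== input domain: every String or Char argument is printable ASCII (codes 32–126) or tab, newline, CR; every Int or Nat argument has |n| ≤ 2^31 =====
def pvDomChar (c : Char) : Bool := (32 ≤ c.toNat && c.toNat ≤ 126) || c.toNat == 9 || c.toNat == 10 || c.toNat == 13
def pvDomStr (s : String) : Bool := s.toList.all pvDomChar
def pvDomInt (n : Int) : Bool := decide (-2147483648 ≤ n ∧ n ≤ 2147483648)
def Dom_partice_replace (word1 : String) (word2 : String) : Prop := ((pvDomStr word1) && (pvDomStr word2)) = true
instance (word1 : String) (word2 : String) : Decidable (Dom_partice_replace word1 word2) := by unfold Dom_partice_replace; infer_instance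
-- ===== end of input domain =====

-- B replaces A's triple scan over all substring slices by one O(n*m) suffix-LCP DP table per
-- recursive call, selecting the same match (longest, then leftmost in the shorter word, then
-- leftmost in the longer) — measurably faster; return values proved equal for all inputs.

-- ===== PORT A =====
-- Python slices w[a:b] with 0 ≤ a ≤ b are exactly drop/take (both clamp); indices here are Nat.
-- 'for z in range(cnt): if great_move == greatest_word[z:z+len(great_move)]: return z'
def pvZloop (gm g : List Char) (z : Nat) : Nat → Option Nat
  | 0 => none
  | cnt+1 =>
    if gm = (g.drop z).take gm.length then some z else pvZloop gm g (z+1) cnt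

-- 'for j in range(cnt): great_move = smallest[j:i+j]; <z loop>'
def pvJloop (s g : List Char) (i j : Nat) : Nat → Option (Nat × Nat)
  | 0 => none
  | cnt+1 =>
    match pvZloop ((s.drop j).take i) g 0 (g.length - ((s.drop j).take i).length + 1) with
    | some z => some (j, z)
    | none => pvJloop s g i (j+1) cnt

-- 'for i in range(min(len1,len2), 0, -1): <j loop>'  (called with i = min = len(smallest))
def pvIloop (s g : List Char) : Nat → Option (Nat × Nat × Nat)
  | 0 => none
  | i+1 =>
    match pvJloop s g (i+1) 0 (s.length - (i+1) + 1) with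
    | some (j, z) => some (i+1, j, z)
    | none => pvIloop s g i

-- fuel makes the recursion structural; fuel = |w1|+|w2|+1 at top level never runs out since the
-- combined length strictly decreases on every recursive call
def pvAuxA : Nat → List Char → List Char → Int
  | 0, _, _ => 0
  | fuel+1, w1, w2 =>
    if min w1.length w2.length = 0 then (↑(max w1.length w2.length) : Int)
    else
      let s := if w1.length > w2.length then w2 else w1
      let g := if w1.length > w2.length then w1 else w2
      match pvIloop s g (min w1.length w2.length) with
      | some (i, j, z) =>
          pvAuxA fuel (s.take j) (g.take z) +
          pvAuxA fuel (s.drop (i+j)) (g.drop (z + ((s.drop j).take i).length))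
      | none => (↑(max w2.length w1.length) : Int)

def partice_replace (word1 : String) (word2 : String) : Int :=
  pvAuxA (word1.toList.length + word2.toList.length + 1) word1.toList word2.toList

-- ===== PORT B =====
-- row j of the LCP table from row j+1: row[z] = prev[z+1]+1 if s[j]==g[z] else 0
def pvRow (cj : Char) : List Char → List Nat → List Nat
  | [], _ => []
  | c :: gs, prev => (if cj = c then prev.tail.headD 0 + 1 else 0) :: pvRow cj gs prev.tail

-- 'for j in range(len(s)-1,-1,-1): prev = [...]; rows.append(prev)' then reverse: a foldr over s
def pvRows (s g : List Char) : List (List Nat) :=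
  (s.foldr (fun c acc => let r := pvRow c g acc.1; (r, r :: acc.2))
    (List.replicate g.length 0, ([] : List (List Nat)))).2

-- 'for z in range(ng): if best < row[z]: best,bj,bz = row[z],j,z'
def pvBestRow (j : Nat) : List Nat → Nat → Nat × Nat × Nat → Nat × Nat × Nat
  | [], _, st => st
  | v :: vs, z, st => pvBestRow j vs (z+1) (if st.1 < v then (v, j, z) else st)

-- 'for j in range(len(s)): <z loop>'
def pvBest : List (List Nat) → Nat → Nat × Nat × Nat → Nat × Nat × Nat
  | [], _, st => st
  | r :: rs, j, st => pvBest rs (j+1) (pvBestRow j r 0 st)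

def pvAuxB : Nat → List Char → List Char → Int
  | 0, _, _ => 0
  | fuel+1, w1, w2 =>
    if w1.isEmpty || w2.isEmpty then (↑(max w1.length w2.length) : Int)
    else
      let s := if w1.length > w2.length then w2 else w1
      let g := if w1.length > w2.length then w1 else w2
      let b := pvBest (pvRows s g) 0 (0, 0, 0)
      if b.1 = 0 then (↑(max w1.length w2.length) : Int)
      else
        pvAuxB fuel (s.take b.2.1) (g.take b.2.2) +
        pvAuxB fuel (s.drop (b.2.1 + b.1)) (g.drop (b.2.2 + b.1))

def partice_replace_alt (word1 : String) (word2 : String) : Int :=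
  pvAuxB (word1.toList.length + word2.toList.length + 1) word1.toList word2.toList

-- ===== PRECONDITION & SPEC =====
def Spec_partice_replace (word1 : String) (word2 : String) (out : Int) : Prop := out = partice_replace_alt word1 word2
instance (word1 : String) (word2 : String) (out : Int) : Decidable (Spec_partice_replace word1 word2 out) := by unfold Spec_partice_replace; infer_instance

-- ===== CLAIM (what is proved, stated in full; the proofs are below) =====
def Claim_equal_partice_replace : Prop := ∀ (word1 : String) (word2 : String), Dom_partice_replace word1 word2 → Spec_partice_replace word1 word2 (partice_replace word1 word2)

-- ===== LEMMAS AND PROOFS =====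

-- longest common prefix length (proof-side reference; neither port uses it)
def pvLcp : List Char → List Char → Nat
  | a :: as, b :: bs => if a = b then pvLcp as bs + 1 else 0
  | _, _ => 0

lemma pvLcp_nil_left (b : List Char) : pvLcp [] b = 0 := by cases b <;> rfl

lemma pvLcp_nil_right (a : List Char) : pvLcp a [] = 0 := by cases a <;> rfl

lemma pvLcp_cons (x y : Char) (as bs : List Char) :
    pvLcp (x :: as) (y :: bs) = if x = y then pvLcp as bs + 1 else 0 := rfl

lemma pvLcp_le_left : ∀ (a b : List Char), pvLcp a b ≤ a.length := by
  intro a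
  induction a with
  | nil => intro b; simp [pvLcp_nil_left]
  | cons x as ih =>
    intro b
    cases b with
    | nil => simp [pvLcp_nil_right]
    | cons y bs =>
      rw [pvLcp_cons]
      split
      · simpa using Nat.succ_le_succ (ih bs)
      · simp

lemma pvLcp_le_right : ∀ (a b : List Char), pvLcp a b ≤ b.length := by
  intro a
  induction a with
  | nil => intro b; simp [pvLcp_nil_left]
  | cons x as ih =>
    intro b
    cases b with
    | nil => simp [pvLcp_nil_right]
    | cons y bs =>
      rw [pvLcp_cons]
      split
      · simpa using Nat.succ_le_succ (ih bs)
      · simp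

lemma pvLcp_drop_zero_left (s t : List Char) (j : Nat) (h : s.length ≤ j) :
    pvLcp (s.drop j) t = 0 := by
  rw [List.drop_eq_nil_of_le h]; exact pvLcp_nil_left t

lemma pvLcp_drop_zero_right (s t : List Char) (z : Nat) (h : t.length ≤ z) :
    pvLcp s (t.drop z) = 0 := by
  rw [List.drop_eq_nil_of_le h]; exact pvLcp_nil_right s

lemma pvTake_eq_iff : ∀ (i : Nat) (a b : List Char), i ≤ a.length →
    (a.take i = b.take i ↔ i ≤ pvLcp a b) := by
  intro i
  induction i with
  | zero => simp
  | succ n ih =>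
    intro a b ha
    cases a with
    | nil => simp at ha
    | cons x as =>
      cases b with
      | nil => simp [pvLcp_nil_right]
      | cons y bs =>
        rw [pvLcp_cons]
        by_cases hxy : x = y
        · subst hxy
          rw [if_pos rfl]
          simp only [List.take_succ_cons, List.cons.injEq, true_and]
          rw [ih as bs (by simpa using ha)]
          omega
        · simp [hxy]

-- ===== A-side loop characterisation =====

lemma pvZloop_none (gm g : List Char) :
    ∀ (cnt z : Nat), (∀ d, d < cnt → gm ≠ (g.drop (z + d)).take gm.length) →
    pvZloop gm g z cnt = none := by
  intro cnt
  induction cnt with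
  | zero => intro z _; rfl
  | succ c ih =>
    intro z h
    rw [pvZloop, if_neg (by simpa using h 0 (by omega))]
    apply ih
    intro d hd
    have e : z + 1 + d = z + (d + 1) := by omega
    rw [e]; exact h (d + 1) (by omega)

lemma pvZloop_some (gm g : List Char) :
    ∀ (cnt z d : Nat), d < cnt → gm = (g.drop (z + d)).take gm.length →
    (∀ d', d' < d → gm ≠ (g.drop (z + d')).take gm.length) →
    pvZloop gm g z cnt = some (z + d) := by
  intro cnt
  induction cnt with
  | zero => intro z d hd; omega
  | succ c ih =>
    intro z d hd hc hmin
    cases d with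
    | zero =>
      rw [pvZloop, if_pos (by simpa using hc)]
      simp
    | succ d' =>
      rw [pvZloop, if_neg (by simpa using hmin 0 (by omega))]
      have e : z + (d' + 1) = z + 1 + d' := by omega
      rw [e]
      apply ih
      · omega
      · rw [← e]; exact hc
      · intro d'' hd''
        have e2 : z + 1 + d'' = z + (d'' + 1) := by omega
        rw [e2]; exact hmin (d'' + 1) (by omega)

-- no z matches length-i block at position j (uses len(great_move) = i, i.e. i + j ≤ |s|)
lemma pvJstep_none (s g : List Char) (i j : Nat) (hij : i + j ≤ s.length)
    (hno : ∀ z, pvLcp (s.drop j) (g.drop z) < i) :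
    pvZloop ((s.drop j).take i) g 0 (g.length - ((s.drop j).take i).length + 1) = none := by
  have hlen : ((s.drop j).take i).length = i := by
    simp [List.length_take, List.length_drop]; omega
  apply pvZloop_none
  intro d _
  rw [hlen]
  intro hEq
  have : i ≤ pvLcp (s.drop j) (g.drop (0 + d)) := by
    rw [← pvTake_eq_iff i (s.drop j) (g.drop (0 + d)) (by simp [List.length_drop]; omega)]
    exact hEq
  exact absurd this (by have := hno (0 + d); omega)

lemma pvJstep_some (s g : List Char) (i j z : Nat) (hi : 1 ≤ i) (hij : i + j ≤ s.length)
    (hz : i ≤ pvLcp (s.drop j) (g.drop z))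
    (hmin : ∀ z', z' < z → pvLcp (s.drop j) (g.drop z') < i) :
    pvZloop ((s.drop j).take i) g 0 (g.length - ((s.drop j).take i).length + 1) = some z := by
  have hlen : ((s.drop j).take i).length = i := by
    simp [List.length_take, List.length_drop]; omega
  have hzg : i + z ≤ g.length := by
    have h1 := pvLcp_le_right (s.drop j) (g.drop z)
    simp [List.length_drop] at h1
    omega
  have hres := pvZloop_some ((s.drop j).take i) g (g.length - i + 1) 0 z
    (by omega)
    (by rw [hlen]
        have : (0 : Nat) + z = z := by omega
        rw [this, pvTake_eq_iff i (s.drop j) (g.drop z) (by simp [List.length_drop]; omega)]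
        exact hz)
    (by intro d' hd'
        rw [hlen]
        have e : (0 : Nat) + d' = d' := by omega
        rw [e]
        intro hEq
        have : i ≤ pvLcp (s.drop j) (g.drop d') := by
          rw [← pvTake_eq_iff i (s.drop j) (g.drop d') (by simp [List.length_drop]; omega)]
          exact hEq
        exact absurd this (by have := hmin d' hd'; omega))
  rw [hlen]
  simpa using hres

lemma pvJloop_none (s g : List Char) (i : Nat) :
    ∀ (cnt j : Nat), (∀ d, d < cnt → i + (j + d) ≤ s.length) →
    (∀ d, d < cnt → ∀ z, pvLcp (s.drop (j + d)) (g.drop z) < i) →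
    pvJloop s g i j cnt = none := by
  intro cnt
  induction cnt with
  | zero => intro j _ _; rfl
  | succ c ih =>
    intro j hb hno
    rw [pvJloop,
        pvJstep_none s g i j (by simpa using hb 0 (by omega)) (by simpa using hno 0 (by omega))]
    show pvJloop s g i (j + 1) c = none
    apply ih
    · intro d hd
      have e : j + 1 + d = j + (d + 1) := by omega
      rw [e]; exact hb (d + 1) (by omega)
    · intro d hd
      have e : j + 1 + d = j + (d + 1) := by omega
      rw [e]; exact hno (d + 1) (by omega)

lemma pvJloop_some (s g : List Char) (i : Nat) (hi : 1 ≤ i) :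
    ∀ (cnt j d z : Nat), d < cnt →
    (∀ d', d' ≤ d → i + (j + d') ≤ s.length) →
    (∀ d', d' < d → ∀ z', pvLcp (s.drop (j + d')) (g.drop z') < i) →
    i ≤ pvLcp (s.drop (j + d)) (g.drop z) →
    (∀ z', z' < z → pvLcp (s.drop (j + d)) (g.drop z') < i) →
    pvJloop s g i j cnt = some (j + d, z) := by
  intro cnt
  induction cnt with
  | zero => intro j d z hd; omega
  | succ c ih =>
    intro j d z hd hb hno hz hmin
    cases d with
    | zero =>
      rw [pvJloop,
          pvJstep_some s g i j z hi (by simpa using hb 0 (by omega)) (by simpa using hz)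
            (by simpa using hmin)]
      simp
    | succ d' =>
      rw [pvJloop,
          pvJstep_none s g i j (by simpa using hb 0 (by omega)) (by simpa using hno 0 (by omega))]
      have e : j + (d' + 1) = j + 1 + d' := by omega
      rw [e] at hz hmin ⊢
      show pvJloop s g i (j + 1) c = some (j + 1 + d', z)
      apply ih (j + 1) d' z (by omega)
      · intro d'' hd''
        have e2 : j + 1 + d'' = j + (d'' + 1) := by omega
        rw [e2]; exact hb (d'' + 1) (by omega)
      · intro d'' hd''
        have e2 : j + 1 + d'' = j + (d'' + 1) := by omega
        rw [e2]; exact hno (d'' + 1) (by omega)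
      · exact hz
      · exact hmin

lemma pvIloop_none (s g : List Char) :
    ∀ (n : Nat), n ≤ s.length → (∀ j z, pvLcp (s.drop j) (g.drop z) = 0) →
    pvIloop s g n = none := by
  intro n
  induction n with
  | zero => intro _ _; rfl
  | succ m ih =>
    intro hn hall
    rw [pvIloop,
        pvJloop_none s g (m + 1) (s.length - (m + 1) + 1) 0
          (by intro d hd; omega)
          (by intro d hd z; have := hall (0 + d) z; omega)]
    show pvIloop s g m = none
    exact ih (by omega) hall

lemma pvIloop_found (s g : List Char) (b bj bz : Nat) (hb : 1 ≤ b)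
    (hL : pvLcp (s.drop bj) (g.drop bz) = b)
    (hub : ∀ j z, pvLcp (s.drop j) (g.drop z) ≤ b)
    (hrow : ∀ j, j < bj → ∀ z, pvLcp (s.drop j) (g.drop z) < b)
    (hcol : ∀ z, z < bz → pvLcp (s.drop bj) (g.drop z) < b) :
    ∀ (n : Nat), n ≤ s.length → b ≤ n → pvIloop s g n = some (b, bj, bz) := by
  have hbjs : b + bj ≤ s.length := by
    have := pvLcp_le_left (s.drop bj) (g.drop bz)
    simp [List.length_drop] at this
    omega
  intro n
  induction n with
  | zero => intro _ h; omega
  | succ m ih =>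
    intro hn hbn
    by_cases hcase : b = m + 1
    · subst hcase
      rw [pvIloop,
          pvJloop_some s g (m + 1) hb (s.length - (m + 1) + 1) 0 bj bz
            (by omega)
            (by intro d' hd'; simp; omega)
            (by intro d' hd' z'; simpa using hrow (0 + d') (by omega) z')
            (by simpa using hL.ge)
            (by intro z' hz'; simpa using hcol z' hz')]
      simp
    · have hblt : b ≤ m := by omega
      rw [pvIloop,
          pvJloop_none s g (m + 1) (s.length - (m + 1) + 1) 0
            (by intro d hd; omega)
            (by intro d hd z; have := hub (0 + d) z; omega)]
      show pvIloop s g m = some (b, bj, bz)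
      exact ih (by omega) hblt

-- ===== B-side table characterisation =====

lemma pvTail_getD (l : List Nat) (z : Nat) : l.tail.getD z 0 = l.getD (z + 1) 0 := by
  cases l <;> simp

lemma pvRow_length (cj : Char) : ∀ (g : List Char) (prev : List Nat),
    (pvRow cj g prev).length = g.length := by
  intro g
  induction g with
  | nil => intro prev; rfl
  | cons c gs ih => intro prev; simp [pvRow, ih]

lemma pvRow_getD (cj : Char) : ∀ (g : List Char) (prev : List Nat) (t : List Char),
    (∀ z, prev.getD z 0 = pvLcp t (g.drop z)) →
    ∀ z, (pvRow cj g prev).getD z 0 = pvLcp (cj :: t) (g.drop z) := by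
  intro g
  induction g with
  | nil =>
    intro prev t _ z
    simp [pvRow, pvLcp_nil_right]
  | cons c gs ih =>
    intro prev t h z
    cases z with
    | zero =>
      have h2 : prev[1]?.getD 0 = pvLcp t gs := by
        have h1 := h 1
        simpa [List.getD] using h1
      simp [pvRow, pvLcp_cons, List.getD, h2]
    | succ z' =>
      have h' : ∀ z, prev.tail.getD z 0 = pvLcp t (gs.drop z) := by
        intro z
        rw [pvTail_getD]
        simpa using h (z + 1)
      simpa [pvRow] using ih prev.tail t h' z'

-- the fold inside pvRows, named so that its unfolding steps can be stated
def pvFold (s g : List Char) : List Nat × List (List Nat) :=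
  s.foldr (fun c acc => let r := pvRow c g acc.1; (r, r :: acc.2))
    (List.replicate g.length 0, ([] : List (List Nat)))

lemma pvRows_eq_fold (s g : List Char) : pvRows s g = (pvFold s g).2 := rfl

lemma pvFold_cons (c : Char) (s g : List Char) :
    pvFold (c :: s) g =
      (pvRow c g (pvFold s g).1, pvRow c g (pvFold s g).1 :: (pvFold s g).2) := rfl

lemma pvRows_spec (g : List Char) : ∀ (s : List Char),
    (∀ z, (pvFold s g).1.getD z 0 = pvLcp s (g.drop z)) ∧
    (∀ j z, ((pvFold s g).2.getD j []).getD z 0 = pvLcp (s.drop j) (g.drop z)) ∧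
    (pvFold s g).2.length = s.length ∧
    (∀ r ∈ (pvFold s g).2, r.length = g.length) := by
  intro s
  induction s with
  | nil =>
    refine ⟨?_, ?_, rfl, ?_⟩
    · intro z
      show (List.replicate g.length (0 : Nat)).getD z 0 = pvLcp [] (g.drop z)
      rw [pvLcp_nil_left]
      rcases Nat.lt_or_ge z g.length with hz | hz
      · simp [List.getD, hz]
      · simp [List.getD, Nat.not_lt.mpr hz]
    · intro j z
      show (([] : List (List Nat)).getD j []).getD z 0 = pvLcp (([] : List Char).drop j) (g.drop z)
      simp [List.getD, pvLcp_nil_left]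
    · intro r hr
      simp [pvFold] at hr
  | cons c s' ih =>
    obtain ⟨ih1, ih2, ih3, ih4⟩ := ih
    refine ⟨?_, ?_, ?_, ?_⟩
    · intro z
      rw [pvFold_cons]
      exact pvRow_getD c g (pvFold s' g).1 s' ih1 z
    · intro j z
      rw [pvFold_cons]
      cases j with
      | zero => simpa using pvRow_getD c g (pvFold s' g).1 s' ih1 z
      | succ j' => simpa using ih2 j' z
    · rw [pvFold_cons]; simpa using ih3
    · intro r hr
      rw [pvFold_cons] at hr
      simp only [List.mem_cons] at hr
      rcases hr with h | h
      · rw [h]; exact pvRow_length c g _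
      · exact ih4 r h

-- ===== B-side best-fold characterisation =====

lemma pvBestRow_spec (Lr : Nat → Nat) (j : Nat) : ∀ (row : List Nat) (z0 : Nat) (st : Nat × Nat × Nat),
    (∀ d, d < row.length → row.getD d 0 = Lr (z0 + d)) →
    (pvBestRow j row z0 st = st ∧ ∀ d, d < row.length → Lr (z0 + d) ≤ st.1) ∨
    (∃ d, d < row.length ∧ pvBestRow j row z0 st = (Lr (z0 + d), j, z0 + d) ∧
      st.1 < Lr (z0 + d) ∧ (∀ d', d' < row.length → Lr (z0 + d') ≤ Lr (z0 + d)) ∧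
      (∀ d', d' < d → Lr (z0 + d') < Lr (z0 + d))) := by
  intro row
  induction row with
  | nil => intro z0 st _; left; exact ⟨rfl, by intro d hd; simp at hd⟩
  | cons v vs ih =>
    intro z0 st h
    have hv : v = Lr z0 := by simpa using h 0 (by simp)
    have h' : ∀ d, d < vs.length → vs.getD d 0 = Lr (z0 + 1 + d) := by
      intro d hd
      have e : z0 + 1 + d = z0 + (d + 1) := by omega
      rw [e]
      simpa using h (d + 1) (by simp; omega)
    by_cases hlt : st.1 < v
    · have hred : pvBestRow j (v :: vs) z0 st = pvBestRow j vs (z0 + 1) (v, j, z0) := by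
        simp [pvBestRow, hlt]
    -- head entry becomes the running best
      rcases ih (z0 + 1) (v, j, z0) h' with ⟨heq, hub⟩ | ⟨d, hd, heq, hgt, hub, hmin⟩
      · right
        refine ⟨0, by simp, by rw [hred, heq]; simp [hv], by simpa [hv] using hlt, ?_, by omega⟩
        intro d' hd'
        cases d' with
        | zero => omega
        | succ d'' =>
          have h1 := hub d'' (by simp at hd'; omega)
          have e : z0 + (d'' + 1) = z0 + 1 + d'' := by omega
          rw [e]
          simp only [Nat.add_zero]
          rw [← hv]
          exact h1
      · right
        refine ⟨d + 1, by simp; omega, ?_, ?_, ?_, ?_⟩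
        · rw [hred, heq]
          have e : z0 + (d + 1) = z0 + 1 + d := by omega
          rw [e]
        · have e : z0 + (d + 1) = z0 + 1 + d := by omega
          rw [e]
          have h2 : (v, j, z0).1 < Lr (z0 + 1 + d) := hgt
          simp only [] at h2
          omega
        · intro d' hd'
          have e : z0 + (d + 1) = z0 + 1 + d := by omega
          rw [e]
          cases d' with
          | zero =>
            have h2 : (v, j, z0).1 < Lr (z0 + 1 + d) := hgt
            simp only [] at h2
            simp only [Nat.add_zero]
            rw [← hv]
            omega
          | succ d'' =>
            have e2 : z0 + (d'' + 1) = z0 + 1 + d'' := by omega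
            rw [e2]
            exact hub d'' (by simp at hd'; omega)
        · intro d' hd'
          have e : z0 + (d + 1) = z0 + 1 + d := by omega
          rw [e]
          cases d' with
          | zero =>
            have h2 : (v, j, z0).1 < Lr (z0 + 1 + d) := hgt
            simp only [] at h2
            simp only [Nat.add_zero]
            rw [← hv]
            omega
          | succ d'' =>
            have e2 : z0 + (d'' + 1) = z0 + 1 + d'' := by omega
            rw [e2]
            exact hmin d'' (by omega)
    · have hred : pvBestRow j (v :: vs) z0 st = pvBestRow j vs (z0 + 1) st := by
        simp [pvBestRow, hlt]
      rcases ih (z0 + 1) st h' with ⟨heq, hub⟩ | ⟨d, hd, heq, hgt, hub, hmin⟩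
      · left
        refine ⟨by rw [hred, heq], ?_⟩
        intro d hd
        cases d with
        | zero =>
          simp only [Nat.add_zero]
          rw [← hv]
          omega
        | succ d'' =>
          have e : z0 + (d'' + 1) = z0 + 1 + d'' := by omega
          rw [e]
          exact hub d'' (by simp at hd; omega)
      · right
        refine ⟨d + 1, by simp; omega, ?_, ?_, ?_, ?_⟩
        · rw [hred, heq]
          have e : z0 + (d + 1) = z0 + 1 + d := by omega
          rw [e]
        · have e : z0 + (d + 1) = z0 + 1 + d := by omega
          rw [e]; exact hgt
        · intro d' hd'
          have e : z0 + (d + 1) = z0 + 1 + d := by omega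
          rw [e]
          cases d' with
          | zero =>
            simp only [Nat.add_zero]
            rw [← hv]
            omega
          | succ d'' =>
            have e2 : z0 + (d'' + 1) = z0 + 1 + d'' := by omega
            rw [e2]
            exact hub d'' (by simp at hd'; omega)
        · intro d' hd'
          have e : z0 + (d + 1) = z0 + 1 + d := by omega
          rw [e]
          cases d' with
          | zero =>
            simp only [Nat.add_zero]
            rw [← hv]
            omega
          | succ d'' =>
            have e2 : z0 + (d'' + 1) = z0 + 1 + d'' := by omega
            rw [e2]
            exact hmin d'' (by omega)

lemma pvBestRow_spec0 (Lr : Nat → Nat) (j : Nat) (row : List Nat) (st : Nat × Nat × Nat)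
    (h : ∀ d, d < row.length → row.getD d 0 = Lr d) :
    (pvBestRow j row 0 st = st ∧ ∀ d, d < row.length → Lr d ≤ st.1) ∨
    (∃ z, z < row.length ∧ pvBestRow j row 0 st = (Lr z, j, z) ∧ st.1 < Lr z ∧
      (∀ d, d < row.length → Lr d ≤ Lr z) ∧ (∀ d, d < z → Lr d < Lr z)) := by
  have h' : ∀ d, d < row.length → row.getD d 0 = Lr (0 + d) := by
    intro d hd; rw [Nat.zero_add]; exact h d hd
  have h0 := pvBestRow_spec Lr j row 0 st h'
  simp only [Nat.zero_add] at h0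
  exact h0

lemma pvBest_spec (L : Nat → Nat → Nat) (glen : Nat) : ∀ (rows : List (List Nat)) (j0 : Nat) (st : Nat × Nat × Nat),
    (∀ r ∈ rows, r.length = glen) →
    (∀ a, a < rows.length → ∀ z, z < glen → (rows.getD a []).getD z 0 = L (j0 + a) z) →
    (pvBest rows j0 st = st ∧ ∀ a, a < rows.length → ∀ z, z < glen → L (j0 + a) z ≤ st.1) ∨
    (∃ a, a < rows.length ∧ ∃ z, z < glen ∧ pvBest rows j0 st = (L (j0 + a) z, j0 + a, z) ∧
      st.1 < L (j0 + a) z ∧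
      (∀ a', a' < rows.length → ∀ z', z' < glen → L (j0 + a') z' ≤ L (j0 + a) z) ∧
      (∀ a', a' < a → ∀ z', z' < glen → L (j0 + a') z' < L (j0 + a) z) ∧
      (∀ z', z' < z → L (j0 + a) z' < L (j0 + a) z)) := by
  intro rows
  induction rows with
  | nil => intro j0 st _ _; left; exact ⟨rfl, by intro a ha; simp at ha⟩
  | cons r rs ih =>
    intro j0 st hlen hval
    have hrlen : r.length = glen := hlen r (by simp)
    have hrget : ∀ d, d < r.length → r.getD d 0 = L j0 d := by
      intro d hd
      simpa using hval 0 (by simp) d (by omega)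
    have hrs_len : ∀ r' ∈ rs, r'.length = glen := fun r' hr' => hlen r' (by simp [hr'])
    have hrs_val : ∀ a, a < rs.length → ∀ z, z < glen → (rs.getD a []).getD z 0 = L (j0 + 1 + a) z := by
      intro a ha z hz
      have e : j0 + 1 + a = j0 + (a + 1) := by omega
      rw [e]
      simpa using hval (a + 1) (by simp; omega) z hz
    have hred : pvBest (r :: rs) j0 st = pvBest rs (j0 + 1) (pvBestRow j0 r 0 st) := rfl
    rcases pvBestRow_spec0 (L j0) j0 r st hrget with ⟨heq1, hub1⟩ | ⟨z, hzr, heq1, hgt1, hub1, hmin1⟩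
    · rcases ih (j0 + 1) (pvBestRow j0 r 0 st) hrs_len hrs_val with ⟨heq2, hub2⟩ | ⟨a, ha, z2, hz2, heq2, hgt2, hub2, hmin2, hcol2⟩
      · left
        constructor
        · rw [hred, heq2, heq1]
        · intro a ha z hz
          cases a with
          | zero => exact hub1 z (by omega)
          | succ a' =>
            have e : j0 + (a' + 1) = j0 + 1 + a' := by omega
            rw [e]
            have h2 := hub2 a' (by simp at ha; omega) z hz
            rwa [heq1] at h2
      · right
        have hB1 : st.1 < L (j0 + 1 + a) z2 := by rw [heq1] at hgt2; exact hgt2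
        refine ⟨a + 1, by simp; omega, z2, hz2, ?_, ?_, ?_, ?_, ?_⟩
        · rw [hred, heq2]
          have e : j0 + (a + 1) = j0 + 1 + a := by omega
          rw [e]
        · have e : j0 + (a + 1) = j0 + 1 + a := by omega
          rw [e]; exact hB1
        · intro a' ha' z' hz'
          have e : j0 + (a + 1) = j0 + 1 + a := by omega
          rw [e]
          cases a' with
          | zero =>
            have h1 : L j0 z' ≤ st.1 := hub1 z' (by omega)
            show L j0 z' ≤ _
            omega
          | succ a'' =>
            have e2 : j0 + (a'' + 1) = j0 + 1 + a'' := by omega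
            rw [e2]
            exact hub2 a'' (by simp at ha'; omega) z' hz'
        · intro a' ha' z' hz'
          have e : j0 + (a + 1) = j0 + 1 + a := by omega
          rw [e]
          cases a' with
          | zero =>
            have h1 : L j0 z' ≤ st.1 := hub1 z' (by omega)
            show L j0 z' < _
            omega
          | succ a'' =>
            have e2 : j0 + (a'' + 1) = j0 + 1 + a'' := by omega
            rw [e2]
            exact hmin2 a'' (by omega) z' hz'
        · intro z' hz'
          have e : j0 + (a + 1) = j0 + 1 + a := by omega
          rw [e]
          exact hcol2 z' hz'
    · rcases ih (j0 + 1) (pvBestRow j0 r 0 st) hrs_len hrs_val with ⟨heq2, hub2⟩ | ⟨a, ha, z2, hz2, heq2, hgt2, hub2, hmin2, hcol2⟩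
      · right
        refine ⟨0, by simp, z, by omega, ?_, ?_, ?_, ?_, ?_⟩
        · rw [hred, heq2, heq1]
          rfl
        · exact hgt1
        · intro a' ha' z' hz'
          cases a' with
          | zero => exact hub1 z' (by omega)
          | succ a'' =>
            have e2 : j0 + (a'' + 1) = j0 + 1 + a'' := by omega
            rw [e2]
            have h2 := hub2 a'' (by simp at ha'; omega) z' hz'
            rw [heq1] at h2
            exact h2
        · intro a' ha'; omega
        · intro z' hz'
          exact hmin1 z' hz'
      · right
        have hB1 : L j0 z < L (j0 + 1 + a) z2 := by
          have h2 := hgt2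
          rw [heq1] at h2
          exact h2
        have hst : st.1 < L j0 z := hgt1
        refine ⟨a + 1, by simp; omega, z2, hz2, ?_, ?_, ?_, ?_, ?_⟩
        · rw [hred, heq2]
          have e : j0 + (a + 1) = j0 + 1 + a := by omega
          rw [e]
        · have e : j0 + (a + 1) = j0 + 1 + a := by omega
          rw [e]
          omega
        · intro a' ha' z' hz'
          have e : j0 + (a + 1) = j0 + 1 + a := by omega
          rw [e]
          cases a' with
          | zero =>
            have h1 : L j0 z' ≤ L j0 z := hub1 z' (by omega)
            show L j0 z' ≤ _
            omega
          | succ a'' =>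
            have e2 : j0 + (a'' + 1) = j0 + 1 + a'' := by omega
            rw [e2]
            exact hub2 a'' (by simp at ha'; omega) z' hz'
        · intro a' ha' z' hz'
          have e : j0 + (a + 1) = j0 + 1 + a := by omega
          rw [e]
          cases a' with
          | zero =>
            have h1 : L j0 z' ≤ L j0 z := hub1 z' (by omega)
            show L j0 z' < _
            omega
          | succ a'' =>
            have e2 : j0 + (a'' + 1) = j0 + 1 + a'' := by omega
            rw [e2]
            exact hmin2 a'' (by omega) z' hz'
        · intro z' hz'
          have e : j0 + (a + 1) = j0 + 1 + a := by omega
          rw [e]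
          exact hcol2 z' hz'

lemma pvBest_final (s g : List Char) :
    (pvBest (pvRows s g) 0 (0, 0, 0) = (0, 0, 0) ∧ ∀ j z, pvLcp (s.drop j) (g.drop z) = 0) ∨
    (∃ b bj bz, pvBest (pvRows s g) 0 (0, 0, 0) = (b, bj, bz) ∧ 1 ≤ b ∧
      pvLcp (s.drop bj) (g.drop bz) = b ∧
      (∀ j z, pvLcp (s.drop j) (g.drop z) ≤ b) ∧
      (∀ j, j < bj → ∀ z, pvLcp (s.drop j) (g.drop z) < b) ∧
      (∀ z, z < bz → pvLcp (s.drop bj) (g.drop z) < b)) := by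
  obtain ⟨h1, h2, h3, h4⟩ := pvRows_spec g s
  have hlenrows : (pvRows s g).length = s.length := by rw [pvRows_eq_fold]; exact h3
  have hlen : ∀ r ∈ pvRows s g, r.length = g.length := by rw [pvRows_eq_fold]; exact h4
  have hval : ∀ a, a < (pvRows s g).length → ∀ z, z < g.length →
      ((pvRows s g).getD a []).getD z 0 = (fun j z => pvLcp (s.drop j) (g.drop z)) (0 + a) z := by
    intro a _ z _
    rw [Nat.zero_add]
    rw [pvRows_eq_fold]
    exact h2 a z
  rcases pvBest_spec (fun j z => pvLcp (s.drop j) (g.drop z)) g.length (pvRows s g) 0 (0, 0, 0)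
      hlen hval with ⟨heq, hub⟩ | ⟨a, ha, z, hz, heq, hgt, hub, hmin, hcol⟩
  · left
    refine ⟨heq, ?_⟩
    intro j z
    rcases Nat.lt_or_ge j s.length with hj | hj
    · rcases Nat.lt_or_ge z g.length with hzz | hzz
      · have h5 := hub j (by omega) z hzz
        simp only [Nat.zero_add] at h5
        omega
      · exact pvLcp_drop_zero_right _ _ _ hzz
    · exact pvLcp_drop_zero_left _ _ _ hj
  · right
    simp only [Nat.zero_add] at heq hgt hub hmin hcol
    refine ⟨pvLcp (s.drop a) (g.drop z), a, z, heq, by omega, rfl, ?_, ?_, ?_⟩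
    · intro j z'
      rcases Nat.lt_or_ge j s.length with hj | hj
      · rcases Nat.lt_or_ge z' g.length with hzz | hzz
        · exact hub j (by omega) z' hzz
        · rw [pvLcp_drop_zero_right _ _ _ hzz]; omega
      · rw [pvLcp_drop_zero_left _ _ _ hj]; omega
    · intro j hj z'
      rcases Nat.lt_or_ge z' g.length with hzz | hzz
      · exact hmin j hj z' hzz
      · rw [pvLcp_drop_zero_right _ _ _ hzz]; omega
    · intro z' hz'
      exact hcol z' hz'

-- ===== per-level equality and main theorem =====

lemma pvCore (f : Nat) (ih : ∀ a b, pvAuxA f a b = pvAuxB f a b)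
    (s g : List Char) :
    (match pvIloop s g s.length with
      | some (i, j, z) =>
          pvAuxA f (s.take j) (g.take z) +
          pvAuxA f (s.drop (i + j)) (g.drop (z + ((s.drop j).take i).length))
      | none => (↑g.length : Int)) =
    (if (pvBest (pvRows s g) 0 (0, 0, 0)).1 = 0 then (↑g.length : Int)
     else
       pvAuxB f (s.take (pvBest (pvRows s g) 0 (0, 0, 0)).2.1)
           (g.take (pvBest (pvRows s g) 0 (0, 0, 0)).2.2) +
         pvAuxB f (s.drop ((pvBest (pvRows s g) 0 (0, 0, 0)).2.1 + (pvBest (pvRows s g) 0 (0, 0, 0)).1))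
           (g.drop ((pvBest (pvRows s g) 0 (0, 0, 0)).2.2 + (pvBest (pvRows s g) 0 (0, 0, 0)).1))) := by
  rcases pvBest_final s g with ⟨hr, hall⟩ | ⟨b, bj, bz, hr, hb, hL, hub, hrow, hcol⟩
  · rw [pvIloop_none s g s.length le_rfl hall, hr]
    simp
  · have hbjs : b + bj ≤ s.length := by
      have h5 := pvLcp_le_left (s.drop bj) (g.drop bz)
      rw [hL] at h5
      simp only [List.length_drop] at h5
      omega
    rw [pvIloop_found s g b bj bz hb hL hub hrow hcol s.length le_rfl (by omega), hr]
    have hlen : ((s.drop bj).take b).length = b := by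
      simp only [List.length_take, List.length_drop]
      omega
    rw [if_neg (by simp; omega)]
    show pvAuxA f (s.take bj) (g.take bz) +
        pvAuxA f (s.drop (b + bj)) (g.drop (bz + ((s.drop bj).take b).length)) =
      pvAuxB f (s.take bj) (g.take bz) + pvAuxB f (s.drop (bj + b)) (g.drop (bz + b))
    rw [hlen, Nat.add_comm b bj, ih (s.take bj) (g.take bz),
        ih (s.drop (bj + b)) (g.drop (bz + b))]

lemma pvLevel (f : Nat) (ih : ∀ a b, pvAuxA f a b = pvAuxB f a b) (w1 w2 : List Char) :
    pvAuxA (f + 1) w1 w2 = pvAuxB (f + 1) w1 w2 := by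
  by_cases h0 : min w1.length w2.length = 0
  · have h : w1.length = 0 ∨ w2.length = 0 := by omega
    have h1 : (w1.isEmpty || w2.isEmpty) = true := by
      rcases h with h | h <;> simp [List.length_eq_zero_iff.mp h]
    simp [pvAuxA, pvAuxB, h0, h1]
  · have hw1 : w1.length ≠ 0 := by omega
    have hw2 : w2.length ≠ 0 := by omega
    have h1 : (w1.isEmpty || w2.isEmpty) = false := by
      cases w1 with
      | nil => simp at hw1
      | cons a as =>
        cases w2 with
        | nil => simp at hw2
        | cons b bs => rfl
    simp only [pvAuxA, pvAuxB]
    rw [if_neg h0]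
    by_cases hgt : w2.length < w1.length
    · simp only [if_pos hgt]
      rw [if_neg (by simp [h1])]
      have e1 : min w1.length w2.length = w2.length := by omega
      have e2 : max w1.length w2.length = w1.length := by omega
      have e3 : max w2.length w1.length = w1.length := by omega
      rw [e1, e3, e2]
      exact pvCore f ih w2 w1
    · simp only [if_neg hgt]
      rw [if_neg (by simp [h1])]
      have e1 : min w1.length w2.length = w1.length := by omega
      have e2 : max w1.length w2.length = w2.length := by omega
      have e3 : max w2.length w1.length = w2.length := by omega
      rw [e1, e3, e2]
      exact pvCore f ih w1 w2

theorem pvAux_eq : ∀ (fuel : Nat) (w1 w2 : List Char), pvAuxA fuel w1 w2 = pvAuxB fuel w1 w2 := by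
  intro fuel
  induction fuel with
  | zero => intro w1 w2; rfl
  | succ f ihf => intro w1 w2; exact pvLevel f ihf w1 w2

-- ===== VERDICT (by name: the statement is the Claim_ definition above) =====
theorem partice_replace_spec : Claim_equal_partice_replace := by
  intro word1 word2 _
  unfold Spec_partice_replace partice_replace partice_replace_alt
  exact pvAux_eq _ _ _
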